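-- pv_equiv track=rewrite | github.com/PatrickC12/ProAnubisReconstruction | ProAnubis_CERN/Scripts/ANUBIS_triggered_functions.py | dark_clustering
-- ===== SOURCE A (Python) =====
-- def dark_clustering(dark_coincidence, anomalous_cutoff =10):
--
--     phi_cluster_distribution = [[] for _ in range(6)] # [[RPC1],[RPC2],[RPC3],...]
--     eta_cluster_distribution = [[] for _ in range(6)]
--     anomalous_clusters = [[] for _ in range(6)] #Store anomalous hits for each RPC
--
--     all_rpc_phi_clusters = []
--     all_rpc_eta_clusters = []
--
--     for coincidence_event in dark_coincidence:
--
--         # coincidence : ['Event x', TIMEBIN, [hit_locations]]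
--         hit_locations = coincidence_event[2]
--         #hit_locations = [[RPC,CHANNEL,HIT_TIME,eta/phi]...]
--
--         #Extract hit_locations in phi and eta directions.
--         phi_locations = [x for x in hit_locations if x[3]=='phi']
--         eta_locations = [x for x in hit_locations if x[3]=='eta']
--
--         #Sort by channels
--         phi_locations = sorted(phi_locations, key=lambda x: x[1])
--         eta_locations = sorted(eta_locations, key=lambda x: x[1])
--
--
--         for RPC in range(6):
--             #Work out the cluster distribution for each RPC during this specific dark count event.
--
--             rpc_phi_clusters = []
--             rpc_eta_clusters = []
--
--             i = 0
--             for index,hit in enumerate([x for x in phi_locations if x[0]==RPC]):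
--                 if index==0:
--                     previous_element = hit[1]
--                     rpc_phi_clusters.append([hit])
--                 else:
--                     if abs(hit[1] - previous_element) > 1:
--                         # Hit is not part of the same cluster, intiate a new cluster
--                         rpc_phi_clusters.append([hit])
--                         i += 1
--                     else:
--                         # Hit is part of the same cluster
--                         rpc_phi_clusters[i].append(hit)
--                     previous_element = hit[1]
--
--             j = 0
--             for index,hit in enumerate([x for x in eta_locations if x[0]==RPC]):
--
--                 if index == 0:
--                     previous_element = hit[1]
--                     rpc_eta_clusters.append([hit])
--                 else:
--                     if abs(hit[1] - previous_element) > 1: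
--                         # Hit is not part of the same cluster
--                         rpc_eta_clusters.append([hit])
--                         j += 1
--                     else:
--                         # Hit is part of the same cluster
--                         rpc_eta_clusters[j].append(hit)
--                     previous_element = hit[1]
--
--             if rpc_phi_clusters:
--                 all_rpc_phi_clusters.append(rpc_phi_clusters)
--             if rpc_eta_clusters:
--                 all_rpc_eta_clusters.append(rpc_eta_clusters)
--
--             for x in rpc_phi_clusters:
--                 if len(x) > anomalous_cutoff:
--                     #ANOMALOUS EVENT, NOISE BURST?
--                     anomalous_clusters[RPC].append(x)
--                 else:
--                     phi_cluster_distribution[RPC].append(len(x))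
--
--             for y in rpc_eta_clusters:
--                 if len(y) > anomalous_cutoff:
--                     anomalous_clusters[RPC].append(y)
--                 else:
--                     eta_cluster_distribution[RPC].append(len(y))
--
--     return all_rpc_eta_clusters,all_rpc_phi_clusters,phi_cluster_distribution,eta_cluster_distribution,anomalous_clusters
-- ===== SOURCE B (Python) =====
-- def _runs(groups, rpc):
--     # Merge the channel groups of one RPC into clusters: channel ch joins the
--     # current cluster exactly when channel ch-1 is also occupied on this RPC.
--     clusters = []
--     for ch in sorted(k[1] for k in groups if k[0] == rpc):
--         if clusters and (rpc, ch - 1) in groups: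
--             clusters[-1].extend(groups[(rpc, ch)])
--         else:
--             clusters.append(list(groups[(rpc, ch)]))
--     return clusters
--
--
-- def dark_clustering(dark_coincidence, anomalous_cutoff=10):
--     phi_cluster_distribution = [[] for _ in range(6)]
--     eta_cluster_distribution = [[] for _ in range(6)]
--     anomalous_clusters = [[] for _ in range(6)]
--     all_rpc_phi_clusters = []
--     all_rpc_eta_clusters = []
--
--     for coincidence_event in dark_coincidence:
--         # Index the event's hits once: (rpc, channel) -> hits in arrival order.
--         # The hit list itself is never sorted.
--         groups = {'phi': {}, 'eta': {}}
--         for h in coincidence_event[2]: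
--             if h[3] in groups:
--                 groups[h[3]].setdefault((h[0], h[1]), []).append(h)
--
--         for rpc in range(6):
--             pc = _runs(groups['phi'], rpc)
--             ec = _runs(groups['eta'], rpc)
--             if pc:
--                 all_rpc_phi_clusters.append(pc)
--             if ec:
--                 all_rpc_eta_clusters.append(ec)
--             for c in pc:
--                 if len(c) > anomalous_cutoff:
--                     anomalous_clusters[rpc].append(c)
--                 else:
--                     phi_cluster_distribution[rpc].append(len(c))
--             for c in ec:
--                 if len(c) > anomalous_cutoff:
--                     anomalous_clusters[rpc].append(c)
--                 else:
--                     eta_cluster_distribution[rpc].append(len(c))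
--
--     return all_rpc_eta_clusters, all_rpc_phi_clusters, phi_cluster_distribution, eta_cluster_distribution, anomalous_clusters
-- ===== Notes on version B (the rewrite author's own statement) =====
-- stated objective: alternative
-- what changed: B never sorts the hit list and has no per-hit adjacency scan: per event it builds one (rpc,channel)->hits dict in a single pass, then for each RPC walks the sorted distinct channels and merges channel ch into the current cluster exactly when channel ch-1 is occupied (a set-membership test), whereas A stably sorts each view's hits and re-filters the sorted list per RPC, clustering hit-by-hit on the distance to the previous hit.
import Mathlib
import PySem

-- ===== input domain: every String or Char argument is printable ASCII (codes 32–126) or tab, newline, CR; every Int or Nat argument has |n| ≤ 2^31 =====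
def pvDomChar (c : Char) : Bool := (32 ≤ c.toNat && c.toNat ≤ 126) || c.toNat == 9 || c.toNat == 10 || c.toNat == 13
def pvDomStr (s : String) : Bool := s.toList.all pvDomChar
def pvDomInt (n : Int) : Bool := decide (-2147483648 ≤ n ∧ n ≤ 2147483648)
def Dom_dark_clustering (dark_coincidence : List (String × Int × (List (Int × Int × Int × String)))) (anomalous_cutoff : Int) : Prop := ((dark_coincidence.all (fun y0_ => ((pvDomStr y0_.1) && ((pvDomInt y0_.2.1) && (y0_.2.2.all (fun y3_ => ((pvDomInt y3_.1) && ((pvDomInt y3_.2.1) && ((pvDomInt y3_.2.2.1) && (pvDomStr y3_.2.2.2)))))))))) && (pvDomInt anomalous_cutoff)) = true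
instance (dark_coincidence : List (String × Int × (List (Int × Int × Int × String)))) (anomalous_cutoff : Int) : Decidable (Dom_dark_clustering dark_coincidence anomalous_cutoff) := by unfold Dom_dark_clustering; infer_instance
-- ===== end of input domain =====

-- B never sorts the hit list: it indexes each event's hits once into a dict keyed by
-- (RPC, channel) and forms clusters by walking the sorted distinct channels of each RPC,
-- merging a channel into the current cluster iff channel-1 is occupied (objective: alternative).


-- a hit [RPC, CHANNEL, HIT_TIME, 'eta'/'phi']
abbrev PvHit := Int × Int × Int × String

-- the five accumulated result lists, in the order Python creates them
structure PvSt where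
  pd : List (List Int)                 -- phi_cluster_distribution
  ed : List (List Int)                 -- eta_cluster_distribution
  an : List (List (List PvHit))        -- anomalous_clusters
  ap : List (List (List PvHit))        -- all_rpc_phi_clusters
  ae : List (List (List PvHit))        -- all_rpc_eta_clusters
deriving Repr, DecidableEq

def pvInitSt : PvSt :=
  { pd := List.replicate 6 [], ed := List.replicate 6 [],
    an := List.replicate 6 [], ap := [], ae := [] }

-- ===== PORT A =====

-- the body of A's 'for index,hit in enumerate(...)' clustering loop; state (i, previous_element, clusters)
def pvClusterStepA (st : Nat × Int × List (List PvHit)) (ih : Int × PvHit) : Nat × Int × List (List PvHit) :=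
  if ih.1 == 0 then (st.1, ih.2.2.1, st.2.2 ++ [[ih.2]])
  else if 1 < (ih.2.2.1 - st.2.1).natAbs then (st.1 + 1, ih.2.2.1, st.2.2 ++ [[ih.2]])
  else (st.1, ih.2.2.1, (st.2.2).modify st.1 (fun c => c ++ [ih.2]))

def pvClusterA (l : List PvHit) : List (List PvHit) :=
  ((PySem.List.enumerate l).foldl pvClusterStepA (0, 0, [])).2.2

-- one pass of A's 'for RPC in range(6)' body for one sorted event
def pvRpcStepA (anomalous_cutoff : Int) (phi_sorted eta_sorted : List PvHit) (s : PvSt) (RPC : Int) : PvSt :=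
  let rpc_phi_clusters := pvClusterA (phi_sorted.filter (fun x => x.1 == RPC))
  let rpc_eta_clusters := pvClusterA (eta_sorted.filter (fun x => x.1 == RPC))
  let s := if rpc_phi_clusters.isEmpty then s else { s with ap := s.ap ++ [rpc_phi_clusters] }
  let s := if rpc_eta_clusters.isEmpty then s else { s with ae := s.ae ++ [rpc_eta_clusters] }
  let s := rpc_phi_clusters.foldl (fun s x =>
      if anomalous_cutoff < (x.length : Int) then { s with an := s.an.modify RPC.toNat (fun c => c ++ [x]) }
      else { s with pd := s.pd.modify RPC.toNat (fun c => c ++ [(x.length : Int)]) }) s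
  rpc_eta_clusters.foldl (fun s y =>
      if anomalous_cutoff < (y.length : Int) then { s with an := s.an.modify RPC.toNat (fun c => c ++ [y]) }
      else { s with ed := s.ed.modify RPC.toNat (fun c => c ++ [(y.length : Int)]) }) s

def pvEventA (anomalous_cutoff : Int) (s : PvSt) (ev : String × Int × List PvHit) : PvSt :=
  let hit_locations := ev.2.2
  let phi_locations := PySem.List.sorted (hit_locations.filter (fun x => x.2.2.2 == "phi")) (fun x => x.2.1) false
  let eta_locations := PySem.List.sorted (hit_locations.filter (fun x => x.2.2.2 == "eta")) (fun x => x.2.1) false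
  (PySem.List.pyRange 0 6 1).foldl (pvRpcStepA anomalous_cutoff phi_locations eta_locations) s

def dark_clustering (dark_coincidence : List (String × Int × (List (Int × Int × Int × String)))) (anomalous_cutoff : Int) : (List (List (List (Int × Int × Int × String)))) × (List (List (List (Int × Int × Int × String)))) × List (List Int) × List (List Int) × (List (List (List (Int × Int × Int × String)))) :=
  let s := dark_coincidence.foldl (pvEventA anomalous_cutoff) pvInitSt
  (s.ae, s.ap, s.pd, s.ed, s.an)

-- ===== PORT B =====

-- Source B's _index: one pass over the event's hits, (rpc, channel) -> hits in arrival order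
def pvIndexB (hits : List PvHit) (tag : String) : PySem.Dict (Int × Int) (List PvHit) :=
  hits.foldl (fun g h => if h.2.2.2 == tag then g.modify (h.1, h.2.1) [] (fun l => l ++ [h]) else g)
    PySem.Dict.empty

-- the body of Source B's _runs loop: channel ch joins the current cluster iff ch-1 is occupied
def pvRunsStepB (g : PySem.Dict (Int × Int) (List PvHit)) (rpc : Int)
    (clusters : List (List PvHit)) (ch : Int) : List (List PvHit) :=
  if clusters ≠ [] ∧ g.contains (rpc, ch - 1) then
    clusters.dropLast ++ [clusters.getLast?.getD [] ++ g.getD (rpc, ch) []]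
  else clusters ++ [g.getD (rpc, ch) []]

-- Source B's _runs: walk the sorted distinct channels of this RPC
def pvRunsB (g : PySem.Dict (Int × Int) (List PvHit)) (rpc : Int) : List (List PvHit) :=
  (PySem.List.sorted ((g.keys.filter (fun k => k.1 == rpc)).map (fun k => k.2)) (fun x => x) false).foldl
    (pvRunsStepB g rpc) []

-- the body of Source B's 'for rpc in range(6)' loop (the tallying code is shared verbatim with A's Python)
def pvRpcStepB (anomalous_cutoff : Int) (gphi geta : PySem.Dict (Int × Int) (List PvHit))
    (s : PvSt) (rpc : Int) : PvSt :=
  let pc := pvRunsB gphi rpc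
  let ec := pvRunsB geta rpc
  let s := if pc.isEmpty then s else { s with ap := s.ap ++ [pc] }
  let s := if ec.isEmpty then s else { s with ae := s.ae ++ [ec] }
  let s := pc.foldl (fun s x =>
      if anomalous_cutoff < (x.length : Int) then { s with an := s.an.modify rpc.toNat (fun c => c ++ [x]) }
      else { s with pd := s.pd.modify rpc.toNat (fun c => c ++ [(x.length : Int)]) }) s
  ec.foldl (fun s y =>
      if anomalous_cutoff < (y.length : Int) then { s with an := s.an.modify rpc.toNat (fun c => c ++ [y]) }
      else { s with ed := s.ed.modify rpc.toNat (fun c => c ++ [(y.length : Int)]) }) s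

def pvEventB (anomalous_cutoff : Int) (s : PvSt) (ev : String × Int × List PvHit) : PvSt :=
  let gphi := pvIndexB ev.2.2 "phi"
  let geta := pvIndexB ev.2.2 "eta"
  (PySem.List.pyRange 0 6 1).foldl (pvRpcStepB anomalous_cutoff gphi geta) s

def dark_clustering_alt (dark_coincidence : List (String × Int × (List (Int × Int × Int × String)))) (anomalous_cutoff : Int) : (List (List (List (Int × Int × Int × String)))) × (List (List (List (Int × Int × Int × String)))) × List (List Int) × List (List Int) × (List (List (List (Int × Int × Int × String)))) :=
  let s := dark_coincidence.foldl (pvEventB anomalous_cutoff) pvInitSt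
  (s.ae, s.ap, s.pd, s.ed, s.an)

-- ===== PRECONDITION & SPEC =====
def Spec_dark_clustering (dark_coincidence : List (String × Int × (List (Int × Int × Int × String)))) (anomalous_cutoff : Int) (out : (List (List (List (Int × Int × Int × String)))) × (List (List (List (Int × Int × Int × String)))) × List (List Int) × List (List Int) × (List (List (List (Int × Int × Int × String))))) : Prop := out = dark_clustering_alt dark_coincidence anomalous_cutoff
instance (dark_coincidence : List (String × Int × (List (Int × Int × Int × String)))) (anomalous_cutoff : Int) (out : (List (List (List (Int × Int × Int × String)))) × (List (List (List (Int × Int × Int × String)))) × List (List Int) × List (List Int) × (List (List (List (Int × Int × Int × String))))) : Decidable (Spec_dark_clustering dark_coincidence anomalous_cutoff out) := by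
  unfold Spec_dark_clustering
  letI d1 : DecidableEq (List (Int × Int × Int × String)) := inferInstance
  letI d2 : DecidableEq (List (List (Int × Int × Int × String))) := inferInstance
  letI d3 : DecidableEq (List (List (List (Int × Int × Int × String)))) := inferInstance
  infer_instance

-- ===== CLAIM (what is proved, stated in full; the proofs are below) =====
def Claim_equal_dark_clustering : Prop := ∀ (dark_coincidence : List (String × Int × (List (Int × Int × Int × String)))) (anomalous_cutoff : Int), Dom_dark_clustering dark_coincidence anomalous_cutoff → Spec_dark_clustering dark_coincidence anomalous_cutoff (dark_clustering dark_coincidence anomalous_cutoff)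

-- ===== LEMMAS AND PROOFS =====

-- ---- A's clustering loop in tail-append form ----

def pvStepT (cs : List (List PvHit)) (h : PvHit) : List (List PvHit) :=
  match cs.getLast? with
  | none => cs ++ [[h]]
  | some c =>
    match c.getLast? with
    | none => cs ++ [[h]]
    | some p => if (h.2.1 - p.2.1).natAbs ≤ 1 then cs.dropLast ++ [c ++ [h]] else cs ++ [[h]]

-- A's clustering step once the enumerate index is known to be nonzero
def pvClusterStepA' (st : Nat × Int × List (List PvHit)) (h : PvHit) : Nat × Int × List (List PvHit) :=
  if 1 < (h.2.1 - st.2.1).natAbs then (st.1 + 1, h.2.1, st.2.2 ++ [[h]])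
  else (st.1, h.2.1, (st.2.2).modify st.1 (fun c => c ++ [h]))

theorem pv_foldl_stepA_pos (ps : List (Int × PvHit)) (st : Nat × Int × List (List PvHit))
    (hpos : ∀ q ∈ ps, q.1 ≠ 0) :
    ps.foldl pvClusterStepA st = (ps.map (·.2)).foldl pvClusterStepA' st := by
  induction ps generalizing st with
  | nil => rfl
  | cons q t ih =>
    have hq : q.1 ≠ 0 := hpos q (by simp)
    simp only [List.foldl_cons, List.map_cons]
    rw [show pvClusterStepA st q = pvClusterStepA' st q.2 by
          simp [pvClusterStepA, pvClusterStepA', hq]]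
    exact ih _ (fun p hp => hpos p (by simp [hp]))

theorem pv_modify_concat {α : Type} (cs : List α) (x : α) (f : α → α) :
    (cs ++ [x]).modify cs.length f = cs ++ [f x] := by
  induction cs with
  | nil => rfl
  | cons a t ih => simpa using ih

theorem pv_clusterAux (t : List PvHit) :
    ∀ (cs : List (List PvHit)) (c : List PvHit) (p : PvHit),
    (t.foldl pvClusterStepA' (cs.length, p.2.1, cs ++ [c ++ [p]])).2.2
      = t.foldl pvStepT (cs ++ [c ++ [p]]) := by
  induction t with
  | nil => intro cs c p; rfl
  | cons h t ih =>
    intro cs c p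
    simp only [List.foldl_cons]
    by_cases hgt : 1 < (h.2.1 - p.2.1).natAbs
    · have hA : pvClusterStepA' (cs.length, p.2.1, cs ++ [c ++ [p]]) h
          = ((cs ++ [c ++ [p]]).length, h.2.1, (cs ++ [c ++ [p]]) ++ [[] ++ [h]]) := by
        simp [pvClusterStepA', hgt]
      have hB : pvStepT (cs ++ [c ++ [p]]) h = (cs ++ [c ++ [p]]) ++ [[] ++ [h]] := by
        simp [pvStepT]
        omega
      rw [hA, hB]
      exact ih (cs ++ [c ++ [p]]) [] h
    · have hA : pvClusterStepA' (cs.length, p.2.1, cs ++ [c ++ [p]]) h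
          = (cs.length, h.2.1, cs ++ [(c ++ [p]) ++ [h]]) := by
        simp [pvClusterStepA', hgt, pv_modify_concat]
      have hB : pvStepT (cs ++ [c ++ [p]]) h = cs ++ [(c ++ [p]) ++ [h]] := by
        have hle : (h.2.1 - p.2.1).natAbs ≤ 1 := by omega
        simp [pvStepT, hle]
      rw [hA, hB]
      exact ih cs (c ++ [p]) h

theorem pv_cluster_eq_foldT (l : List PvHit) : pvClusterA l = l.foldl pvStepT [] := by
  cases l with
  | nil => rfl
  | cons h t =>
    unfold pvClusterA
    rw [PySem.List.enumerate_cons]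
    simp only [List.foldl_cons]
    have h0 : pvClusterStepA (0, 0, []) (0, h) = (([] : List (List PvHit)).length, h.2.1, [] ++ [[] ++ [h]]) := by
      simp [pvClusterStepA]
    have hpos : ∀ q ∈ PySem.List.enumerate t (0 + 1), q.1 ≠ 0 := by
      intro q hq
      rcases (PySem.List.mem_enumerate_iff _ _ _).1 hq with ⟨k, hk, rfl⟩
      omega
    have hB0 : pvStepT [] h = [] ++ [[] ++ [h]] := by rfl
    rw [h0, pv_foldl_stepA_pos _ _ hpos, PySem.List.map_snd_enumerate, pv_clusterAux, hB0]

-- ---- group absorption: a run of same-channel hits all lands in the last cluster ----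

theorem pv_absorb (g : List PvHit) (c : Int) (hg : ∀ h ∈ g, h.2.1 = c) :
    ∀ (cs : List (List PvHit)) (cl : List PvHit) (h0 : PvHit), h0.2.1 = c →
    g.foldl pvStepT (cs ++ [cl ++ [h0]]) = cs ++ [cl ++ h0 :: g] := by
  induction g with
  | nil => intro cs cl h0 _; simp
  | cons h t ih =>
    intro cs cl h0 h0c
    have hh : h.2.1 = c := hg h (by simp)
    have hstep : pvStepT (cs ++ [cl ++ [h0]]) h = cs ++ [(cl ++ [h0]) ++ [h]] := by
      have : (h.2.1 - h0.2.1).natAbs ≤ 1 := by rw [hh, h0c]; simp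
      simp [pvStepT, this]
    simp only [List.foldl_cons, hstep]
    rw [ih (fun x hx => hg x (by simp [hx])) cs (cl ++ [h0]) h hh]
    simp

-- ---- the stable sort by channel is the concatenation of the channel groups ----

theorem pv_insertBy_append_not {bef : PvHit → PvHit → Bool} {x : PvHit} (as bs : List PvHit)
    (h : ∀ y ∈ as, bef x y = false) :
    PySem.List.insertBy bef x (as ++ bs) = as ++ PySem.List.insertBy bef x bs := by
  induction as with
  | nil => simp
  | cons a t ih =>
    have ha : bef x a = false := h a (by simp)
    simp [PySem.List.insertBy, ha, ih (fun y hy => h y (by simp [hy]))]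

theorem pv_insertBy_all_true {bef : PvHit → PvHit → Bool} {x : PvHit} (bs : List PvHit)
    (h : ∀ y ∈ bs, bef x y = true) :
    PySem.List.insertBy bef x bs = x :: bs := by
  cases bs with
  | nil => rfl
  | cons b t => simp [PySem.List.insertBy, h b (by simp)]

theorem pv_nox (x : PvHit) (cs : List Int) (l : List PvHit) (hnx : x.2.1 ∉ cs) :
    cs.flatMap (fun c => l.filter (fun h => h.2.1 == c) ++ if x.2.1 == c then [x] else [])
      = cs.flatMap (fun c => l.filter (fun h => h.2.1 == c)) := by
  induction cs with
  | nil => simp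
  | cons c t ih =>
    have hne : (x.2.1 == c) = false := by
      simp only [beq_eq_false_iff_ne, ne_eq]
      intro h; exact hnx (by simp [h])
    simp only [List.flatMap_cons, hne]
    rw [ih (fun h => hnx (by simp [h]))]
    simp

theorem pv_ins (l : List PvHit) (x : PvHit) (chans : List Int)
    (hs : chans.Pairwise (· < ·)) (hx : x.2.1 ∈ chans) :
    PySem.List.insertBy (fun a b => decide (a.2.1 < b.2.1)) x
        (chans.flatMap (fun c => l.filter (fun h => h.2.1 == c)))
      = chans.flatMap (fun c => l.filter (fun h => h.2.1 == c) ++ if x.2.1 == c then [x] else []) := by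
  induction chans with
  | nil => simp at hx
  | cons c rest ih =>
    simp only [List.flatMap_cons]
    rcases (by simpa using hx : x.2.1 = c ∨ x.2.1 ∈ rest) with heq | hmem
    · have hnotbef : ∀ y ∈ l.filter (fun h => h.2.1 == c), (decide (x.2.1 < y.2.1)) = false := by
        intro y hy
        have : y.2.1 = c := by simpa using (List.of_mem_filter hy)
        simp [this, heq]
      rw [pv_insertBy_append_not _ _ hnotbef]
      have halltrue : ∀ y ∈ rest.flatMap (fun c => l.filter (fun h => h.2.1 == c)),
          (decide (x.2.1 < y.2.1)) = true := by
        intro y hy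
        rcases List.mem_flatMap.1 hy with ⟨c', hc', hyf⟩
        have hy2 : y.2.1 = c' := by simpa using (List.of_mem_filter hyf)
        have : c < c' := (List.pairwise_cons.1 hs).1 c' hc'
        simp [hy2, heq]; omega
      rw [pv_insertBy_all_true _ halltrue]
      have hrestno : x.2.1 ∉ rest := by
        intro hr
        have : c < x.2.1 := (List.pairwise_cons.1 hs).1 _ hr
        omega
      rw [pv_nox x rest l hrestno]
      have : (x.2.1 == c) = true := by simpa using heq
      simp [this]
    · have hcx : c < x.2.1 := (List.pairwise_cons.1 hs).1 _ hmem
      have hnotbef : ∀ y ∈ l.filter (fun h => h.2.1 == c), (decide (x.2.1 < y.2.1)) = false := by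
        intro y hy
        have : y.2.1 = c := by simpa using (List.of_mem_filter hy)
        simp [this]; omega
      rw [pv_insertBy_append_not _ _ hnotbef, ih (List.pairwise_cons.1 hs).2 hmem]
      have : (x.2.1 == c) = false := by simp; omega
      simp [this]

theorem pv_sort_flat (l : List PvHit) (chans : List Int)
    (hs : chans.Pairwise (· < ·)) (hcov : ∀ h ∈ l, h.2.1 ∈ chans) :
    PySem.List.sorted l (fun x => x.2.1) false
      = chans.flatMap (fun c => l.filter (fun h => h.2.1 == c)) := by
  induction l using List.reverseRecOn with
  | nil => simp [PySem.List.sorted_eq_foldl_insertBy]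
  | append_singleton l x ih =>
    rw [PySem.List.sorted_eq_foldl_insertBy, List.foldl_append,
        ← PySem.List.sorted_eq_foldl_insertBy, List.foldl_cons, List.foldl_nil]
    rw [ih (fun h hh => hcov h (by simp [hh]))]
    rw [pv_ins l x chans hs (hcov x (by simp))]
    congr 1
    funext c
    simp [List.filter_append, List.filter_singleton]

-- ---- the abstract run-merging fold (B's loop with the dict abstracted away) ----

def pvAbsStep (gw : Int → List PvHit) (S : List Int)
    (cs : List (List PvHit)) (c : Int) : List (List PvHit) :=
  if cs ≠ [] ∧ (c - 1) ∈ S then cs.dropLast ++ [cs.getLast?.getD [] ++ gw c] else cs ++ [gw c]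

theorem pv_main (gw : Int → List PvHit) (S : List Int) :
    ∀ (rest : List Int) (p : Int) (cs : List (List PvHit)) (cl : List PvHit) (h0 : PvHit),
    h0.2.1 = p →
    rest.Pairwise (· < ·) → (∀ c ∈ rest, p < c) →
    (∀ c ∈ rest, gw c ≠ [] ∧ ∀ h ∈ gw c, h.2.1 = c) →
    (∀ c ∈ rest, ((c - 1) ∈ S ↔ c - 1 = p ∨ c - 1 ∈ rest)) →
    (rest.flatMap gw).foldl pvStepT (cs ++ [cl ++ [h0]])
      = rest.foldl (pvAbsStep gw S) (cs ++ [cl ++ [h0]]) := by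
  intro rest
  induction rest with
  | nil => intro p cs cl h0 _ _ _ _ _; simp
  | cons c rest' ih =>
    intro p cs cl h0 h0p hpw hgt hgrp hmem
    obtain ⟨hne, hch⟩ := hgrp c (by simp)
    have hpc : p < c := hgt c (by simp)
    have hrest_gt : ∀ c' ∈ rest', c < c' := (List.pairwise_cons.1 hpw).1
    -- the head condition on both sides is 'c - 1 = p'
    have hmemS : ((c - 1) ∈ S) ↔ c - 1 = p := by
      rw [hmem c (by simp)]
      constructor
      · rintro (h | h)
        · exact h
        · rcases List.mem_cons.1 h with h' | h'
          · omega
          · have := hrest_gt _ h'; omega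
      · intro h; exact Or.inl h
    simp only [List.flatMap_cons, List.foldl_append, List.foldl_cons]
    -- process the group gw c on both sides
    obtain ⟨h, g', hgw⟩ : ∃ h g', gw c = h :: g' := by
      cases hg : gw c with
      | nil => exact absurd hg hne
      | cons a b => exact ⟨a, b, rfl⟩
    have hhc : h.2.1 = c := hch h (by rw [hgw]; simp)
    have hg'c : ∀ z ∈ g', z.2.1 = c := fun z hz => hch z (by rw [hgw]; simp [hz])
    by_cases hcp : c - 1 = p
    · -- merge into the last cluster
      have hstep : pvStepT (cs ++ [cl ++ [h0]]) h = cs ++ [(cl ++ [h0]) ++ [h]] := by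
        have : (h.2.1 - h0.2.1).natAbs ≤ 1 := by simp only [hhc, h0p]; omega
        simp [pvStepT, this]
      have habs : (gw c).foldl pvStepT (cs ++ [cl ++ [h0]]) = cs ++ [(cl ++ [h0]) ++ gw c] := by
        rw [hgw]; simp only [List.foldl_cons, hstep]
        rw [pv_absorb g' c hg'c cs (cl ++ [h0]) h hhc]
      have hB : pvAbsStep gw S (cs ++ [cl ++ [h0]]) c = cs ++ [(cl ++ [h0]) ++ gw c] := by
        have hS : (c - 1) ∈ S := hmemS.2 hcp
        simp [pvAbsStep, hS]
      rw [habs, hB]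
      -- shape for the IH: strip the last element of gw c
      have hKne : (cl ++ [h0]) ++ gw c ≠ [] := by simp
      have hlast_mem : ((cl ++ [h0]) ++ gw c).getLast hKne ∈ gw c := by
        rw [List.getLast_append_of_ne_nil hKne hne]
        exact List.getLast_mem hne
      have hlastc : (((cl ++ [h0]) ++ gw c).getLast hKne).2.1 = c := hch _ hlast_mem
      have hdec : (cl ++ [h0]) ++ gw c
          = ((cl ++ [h0]) ++ gw c).dropLast ++ [((cl ++ [h0]) ++ gw c).getLast hKne] := by
        exact (List.dropLast_append_getLast hKne).symm
      rw [hdec]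
      exact ih c cs _ _ hlastc (List.pairwise_cons.1 hpw).2 hrest_gt
        (fun c' hc' => hgrp c' (by simp [hc']))
        (fun c' hc' => by
          rw [hmem c' (by simp [hc'])]
          have hcc' : c < c' := hrest_gt c' hc'
          constructor
          · rintro (h' | h')
            · omega
            · rcases List.mem_cons.1 h' with h'' | h'' <;> [exact Or.inl h''; exact Or.inr h'']
          · rintro (h' | h')
            · exact Or.inr (by simp [h'])
            · exact Or.inr (by simp [h']))
    · -- start a new cluster
      have hstep : pvStepT (cs ++ [cl ++ [h0]]) h = (cs ++ [cl ++ [h0]]) ++ [[] ++ [h]] := by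
        have : ¬ (h.2.1 - h0.2.1).natAbs ≤ 1 := by simp only [hhc, h0p]; omega
        simp [pvStepT, this]
      have habs : (gw c).foldl pvStepT (cs ++ [cl ++ [h0]]) = (cs ++ [cl ++ [h0]]) ++ [gw c] := by
        rw [hgw]; simp only [List.foldl_cons, hstep]
        rw [pv_absorb g' c hg'c (cs ++ [cl ++ [h0]]) [] h hhc]; simp
      have hB : pvAbsStep gw S (cs ++ [cl ++ [h0]]) c = (cs ++ [cl ++ [h0]]) ++ [gw c] := by
        simp [pvAbsStep, hmemS, hcp]
      rw [habs, hB]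
      have hlastc : ((gw c).getLast hne).2.1 = c := hch _ (List.getLast_mem hne)
      have hdec : gw c = (gw c).dropLast ++ [(gw c).getLast hne] :=
        (List.dropLast_append_getLast hne).symm
      rw [hdec]
      exact ih c (cs ++ [cl ++ [h0]]) _ _ hlastc (List.pairwise_cons.1 hpw).2 hrest_gt
        (fun c' hc' => hgrp c' (by simp [hc']))
        (fun c' hc' => by
          rw [hmem c' (by simp [hc'])]
          have hcc' : c < c' := hrest_gt c' hc'
          constructor
          · rintro (h' | h')
            · omega
            · rcases List.mem_cons.1 h' with h'' | h'' <;> [exact Or.inl h''; exact Or.inr h'']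
          · rintro (h' | h')
            · exact Or.inr (by simp [h'])
            · exact Or.inr (by simp [h']))

-- ---- dict facts ----

theorem pv_index_eq_aux (hits : List PvHit) (tag : String) (d : PySem.Dict (Int × Int) (List PvHit)) :
    hits.foldl (fun g h => if h.2.2.2 == tag then g.modify (h.1, h.2.1) [] (fun l => l ++ [h]) else g) d
      = ((hits.filter (fun h => h.2.2.2 == tag)).map (fun h => ((h.1, h.2.1), h))).foldl
          (fun d p => d.modify p.1 [] (fun l => l ++ [p.2])) d := by
  induction hits generalizing d with
  | nil => rfl
  | cons h t ih =>
    by_cases htag : h.2.2.2 == tag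
    · simp only [List.foldl_cons, List.filter_cons, htag, if_true, List.map_cons, ih]
    · simp only [List.foldl_cons, List.filter_cons, htag, if_false, Bool.false_eq_true, ih]

theorem pv_index_keys (hits : List PvHit) (tag : String) :
    (pvIndexB hits tag).keys
      = PySem.Set.ofList ((hits.filter (fun h => h.2.2.2 == tag)).map (fun h => (h.1, h.2.1))) := by
  rw [pvIndexB, pv_index_eq_aux, PySem.Dict.keys_foldl_modify_key]
  rw [List.map_map]
  rw [show PySem.Dict.empty.keys = ([] : List (Int × Int)) from rfl]
  rw [PySem.Set.update_nil_left]
  rfl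

theorem pv_getD_aux (r c : Int) (l : List PvHit) :
    ((l.map (fun h => ((h.1, h.2.1), h))).filter (fun p => p.1 == (r, c))).map (fun p => p.2)
      = (l.filter (fun h => h.1 == r)).filter (fun h => h.2.1 == c) := by
  induction l with
  | nil => rfl
  | cons h t ih =>
    simp only [List.map_cons, List.filter_cons,
      show (((h.1, h.2.1), h).1 == (r, c)) = (h.1 == r && h.2.1 == c) from rfl]
    by_cases h1 : h.1 = r
    · by_cases h2 : h.2.1 = c
      · have b1 : (h.1 == r) = true := by simp [h1]
        have b2 : (h.2.1 == c) = true := by simp [h2]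
        simp only [b1, b2, Bool.and_self, if_true, List.map_cons, List.filter_cons, ih]
      · have b1 : (h.1 == r) = true := by simp [h1]
        have b2 : (h.2.1 == c) = false := by simp [h2]
        simp [b1, b2, ih]
    · have b1 : (h.1 == r) = false := by simp [h1]
      simp only [b1, Bool.false_and, Bool.false_eq_true, if_false, ih]

theorem pv_index_getD (hits : List PvHit) (tag : String) (r c : Int) :
    (pvIndexB hits tag).getD (r, c) []
      = ((hits.filter (fun h => h.2.2.2 == tag)).filter (fun h => h.1 == r)).filter
          (fun h => h.2.1 == c) := by
  rw [pvIndexB, pv_index_eq_aux, PySem.Dict.getD_foldl_modify_append]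
  rw [show (PySem.Dict.empty : PySem.Dict (Int × Int) (List PvHit)).getD (r, c) [] = [] from rfl]
  rw [List.nil_append]
  exact pv_getD_aux r c _

-- ---- the per-RPC, per-view equality ----

theorem pv_strict_eq (l1 l2 : List Int) (h1 : l1.Pairwise (· < ·)) (h2 : l2.Pairwise (· < ·))
    (hm : ∀ x, x ∈ l1 ↔ x ∈ l2) : l1 = l2 := by
  exact List.Perm.eq_of_pairwise
    (fun a b _ _ hab hba => absurd hba (not_lt.2 (le_of_lt hab))) h1 h2
    ((List.perm_ext_iff_of_nodup (h1.imp ne_of_lt) (h2.imp ne_of_lt)).2 hm)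

theorem pv_sorted_lt_of_nodup (xs : List Int) (h : xs.Nodup) :
    (PySem.List.sorted xs (fun x => x) false).Pairwise (· < ·) := by
  have hle := PySem.List.sorted_pairwise xs (fun x => x) (κ := Int)
  have hnd : (PySem.List.sorted xs (fun x => x) false).Nodup :=
    ((PySem.List.sorted_perm xs (fun x => x) false).nodup_iff).2 h
  exact (hle.and hnd).imp (fun h => lt_of_le_of_ne h.1 h.2)

theorem pv_filter_flatMap {α β : Type} (cs : List α) (f : α → List β) (p : β → Bool) :
    (cs.flatMap f).filter p = cs.flatMap (fun c => (f c).filter p) := by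
  induction cs with
  | nil => rfl
  | cons c t ih => simp [List.flatMap_cons, List.filter_append, ih]

theorem pv_flatMap_prune (gw : Int → List PvHit) (cs : List Int) :
    cs.flatMap gw = (cs.filter (fun c => !(gw c).isEmpty)).flatMap gw := by
  induction cs with
  | nil => rfl
  | cons c t ih =>
    by_cases hc : (gw c).isEmpty
    · have hnil : gw c = [] := List.isEmpty_iff.1 hc
      simp [List.flatMap_cons, hnil, ih]
    · simp [List.flatMap_cons, hc, ih]

theorem pv_filter_comm (l : List PvHit) (p q : PvHit → Bool) :
    (l.filter p).filter q = (l.filter q).filter p := by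
  rw [List.filter_filter, List.filter_filter]
  exact List.filter_congr (fun x _ => Bool.and_comm _ _)

theorem pv_per_rpc (hits : List PvHit) (tag : String) (r : Int) :
    pvClusterA ((PySem.List.sorted (hits.filter (fun x => x.2.2.2 == tag)) (fun x => x.2.1) false).filter
        (fun x => x.1 == r))
      = pvRunsB (pvIndexB hits tag) r := by
  set v := hits.filter (fun x => x.2.2.2 == tag) with hv
  set g := pvIndexB hits tag with hgdef
  set gw : Int → List PvHit :=
    fun c => (v.filter (fun x => x.1 == r)).filter (fun h => h.2.1 == c) with hgwdef
  set chansB := PySem.List.sorted ((g.keys.filter (fun k => k.1 == r)).map (fun k => k.2))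
    (fun x => x) false with hchB
  have hkeys : g.keys = PySem.Set.ofList (v.map (fun h => (h.1, h.2.1))) := pv_index_keys hits tag
  have hkeysmem : ∀ k, k ∈ g.keys ↔ k ∈ v.map (fun h => (h.1, h.2.1)) := by
    intro k; rw [hkeys]; simp [PySem.Set.mem_ofList]
  have hgetD : ∀ c, g.getD (r, c) [] = gw c := fun c => pv_index_getD hits tag r c
  have hchmem : ∀ c, c ∈ chansB ↔ (r, c) ∈ g.keys := by
    intro c
    rw [hchB, PySem.List.mem_sorted]
    constructor
    · intro hc
      rcases List.mem_map.1 hc with ⟨k, hk, rfl⟩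
      have hkf := List.mem_filter.1 hk
      have hr : k.1 = r := by simpa using hkf.2
      have : (r, k.2) = k := by rw [← hr]
      rw [this]; exact hkf.1
    · intro hk
      exact List.mem_map.2 ⟨(r, c), List.mem_filter.2 ⟨hk, by simp⟩, rfl⟩
  have hne_iff : ∀ c, gw c ≠ [] ↔ (r, c) ∈ g.keys := by
    intro c
    rw [hkeysmem]
    constructor
    · intro hne
      obtain ⟨h, hh⟩ := List.exists_mem_of_ne_nil _ hne
      have h1 := List.mem_filter.1 hh
      have h2 := List.mem_filter.1 h1.1
      refine List.mem_map.2 ⟨h, h2.1, ?_⟩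
      have hr : h.1 = r := by simpa using h2.2
      have hc : h.2.1 = c := by simpa using h1.2
      rw [hr, hc]
    · intro hm hnil
      rcases List.mem_map.1 hm with ⟨h, hhv, heq⟩
      have hr : h.1 = r := congrArg Prod.fst heq
      have hc : h.2.1 = c := congrArg Prod.snd heq
      have : h ∈ gw c := by
        rw [hgwdef]
        exact List.mem_filter.2 ⟨List.mem_filter.2 ⟨hhv, by simp [hr]⟩, by simp [hc]⟩
      rw [hnil] at this
      exact absurd this (List.not_mem_nil)
  have hGRP : ∀ c ∈ chansB, gw c ≠ [] ∧ ∀ h ∈ gw c, h.2.1 = c := by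
    intro c hc
    refine ⟨(hne_iff c).2 ((hchmem c).1 hc), ?_⟩
    intro h hh
    simpa using (List.mem_filter.1 hh).2
  have hPW : chansB.Pairwise (· < ·) := by
    rw [hchB]
    apply pv_sorted_lt_of_nodup
    have hkND : g.keys.Nodup := by rw [hkeys]; exact PySem.Set.nodup_ofList _
    refine List.Nodup.map_on ?_ (hkND.filter _)
    intro x hx y hy hxy
    have hxr : x.1 = r := by simpa using (List.mem_filter.1 hx).2
    have hyr : y.1 = r := by simpa using (List.mem_filter.1 hy).2
    exact Prod.ext (by rw [hxr, hyr]) hxy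
  set CH := PySem.List.sorted (PySem.Set.ofList (v.map (fun x => x.2.1))) (fun x => x) false with hCH
  have hCOVv : ∀ h ∈ v, h.2.1 ∈ CH := by
    intro h hh
    rw [hCH, PySem.List.mem_sorted]
    simp only [PySem.Set.mem_ofList]
    exact List.mem_map_of_mem hh
  have hLHSlist :
      (PySem.List.sorted v (fun x => x.2.1) false).filter (fun x => x.1 == r)
        = chansB.flatMap gw := by
    rw [pv_sort_flat v CH (by rw [hCH]; exact PySem.List.sorted_ofList_pairwise_lt _) hCOVv]
    rw [pv_filter_flatMap]
    have hgrp_eq : (fun c => (v.filter (fun h => h.2.1 == c)).filter (fun x => x.1 == r)) = gw := by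
      funext c; rw [hgwdef]; exact pv_filter_comm v _ _
    rw [hgrp_eq, pv_flatMap_prune gw CH]
    congr 1
    apply pv_strict_eq
    · exact (by rw [hCH]; exact PySem.List.sorted_ofList_pairwise_lt _ : CH.Pairwise (· < ·)).filter _
    · exact hPW
    · intro c
      rw [List.mem_filter]
      constructor
      · rintro ⟨hcCH, hcne⟩
        have hne : gw c ≠ [] := by simpa using hcne
        exact (hchmem c).2 ((hne_iff c).1 hne)
      · intro hc
        obtain ⟨hne, _⟩ := hGRP c hc
        refine ⟨?_, by simpa using hne⟩
        obtain ⟨h, hh⟩ := List.exists_mem_of_ne_nil _ hne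
        have hmemv : h ∈ v := (List.mem_filter.1 (List.mem_filter.1 hh).1).1
        have hc2 : h.2.1 = c := by simpa using (List.mem_filter.1 hh).2
        rw [hCH, PySem.List.mem_sorted]
        simp only [PySem.Set.mem_ofList]
        exact hc2 ▸ List.mem_map_of_mem hmemv
  have hRHS : pvRunsB g r = chansB.foldl (pvAbsStep gw chansB) [] := by
    rw [pvRunsB, ← hchB]
    apply PySem.List.foldl_congr_mem
    intro acc ch _
    rw [pvRunsStepB, pvAbsStep, hgetD]
    have hcont : (g.contains (r, ch - 1) = true) ↔ ((ch - 1) ∈ chansB) := by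
      rw [PySem.Dict.contains_iff_mem_keys, hchmem]
    by_cases hacc : acc = []
    · simp [hacc]
    · by_cases hm : (ch - 1) ∈ chansB
      · rw [if_pos ⟨hacc, hcont.2 hm⟩, if_pos ⟨hacc, hm⟩]
      · rw [if_neg (fun hx => hm (hcont.1 hx.2)), if_neg (fun hx => hm hx.2)]
  rw [pv_cluster_eq_foldT, hLHSlist, hRHS]
  rcases hE : chansB with _ | ⟨c0, rest⟩
  · simp
  · obtain ⟨hne0, hch0⟩ := hGRP c0 (by rw [hE]; simp)
    obtain ⟨h, g', hg0⟩ : ∃ h g', gw c0 = h :: g' := by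
      cases hg : gw c0 with
      | nil => exact absurd hg hne0
      | cons a b => exact ⟨a, b, rfl⟩
    have hhc : h.2.1 = c0 := hch0 h (by rw [hg0]; simp)
    simp only [List.flatMap_cons, List.foldl_append, List.foldl_cons]
    have habs : (gw c0).foldl pvStepT [] = [gw c0] := by
      rw [hg0]
      simp only [List.foldl_cons]
      rw [show pvStepT [] h = [] ++ [[] ++ [h]] from rfl]
      rw [pv_absorb g' c0 (fun z hz => hch0 z (by rw [hg0]; simp [hz])) [] [] h hhc]
      simp
    have hB0 : pvAbsStep gw (c0 :: rest) [] c0 = [gw c0] := by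
      simp [pvAbsStep]
    rw [habs, hB0]
    have hlast : ((gw c0).getLast hne0).2.1 = c0 := hch0 _ (List.getLast_mem hne0)
    have hdec : ([gw c0] : List (List PvHit))
        = [(gw c0).dropLast ++ [(gw c0).getLast hne0]] := by
      rw [List.dropLast_append_getLast]
    rw [hdec]
    have hpw' : rest.Pairwise (· < ·) := by
      have := hPW; rw [hE] at this; exact (List.pairwise_cons.1 this).2
    have hgt' : ∀ c ∈ rest, c0 < c := by
      have := hPW; rw [hE] at this; exact (List.pairwise_cons.1 this).1
    have hgrp' : ∀ c ∈ rest, gw c ≠ [] ∧ ∀ z ∈ gw c, z.2.1 = c := by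
      intro c hc; exact hGRP c (by rw [hE]; simp [hc])
    have hmem' : ∀ c ∈ rest, ((c - 1) ∈ (c0 :: rest) ↔ c - 1 = c0 ∨ c - 1 ∈ rest) := by
      intro c _; simp
    have := pv_main gw (c0 :: rest) rest c0 [] ((gw c0).dropLast) ((gw c0).getLast hne0)
      hlast hpw' hgt' hgrp' hmem'
    simpa using this

theorem pv_event_eq (cut : Int) (s : PvSt) (ev : String × Int × List PvHit) :
    pvEventA cut s ev = pvEventB cut s ev := by
  simp only [pvEventA, pvEventB]
  apply PySem.List.foldl_congr_mem
  intro s' rpc _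
  simp only [pvRpcStepA, pvRpcStepB, pv_per_rpc]

-- ===== VERDICT (by name: the statement is the Claim_ definition above) =====
theorem dark_clustering_spec : Claim_equal_dark_clustering := by
  intro dc cut _
  unfold Spec_dark_clustering dark_clustering dark_clustering_alt
  have hfun : pvEventA cut = pvEventB cut :=
    funext fun s => funext fun ev => pv_event_eq cut s ev
  rw [hfun]
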